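-- pv_equiv track=rewrite | github.com/v4mpire77/bmad-backletter | blackletter/blackletter-upstream/src/backend/app/core/redact.py | create_summary_markdown
-- ===== SOURCE A (Python) =====
-- from typing import Dict, List, Optional, Tuple, Union, Any
--
-- def create_summary_markdown(
--     issues: List[Dict[str, Any]],
--     title: Optional[str] = None
-- ) -> str:
--     """
--     Create a markdown summary of document issues.
--
--     Args:
--         issues: List of issues with keys:
--                text, start, end, severity, comment, suggestion
--         title: Optional document title
--
--     Returns:
--         str: Markdown summary
--     """
--     markdown = []
--
--     # Add title
--     if title:
--         markdown.append(f"# {title}")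
--         markdown.append("")
--
--     # Add summary section
--     markdown.append("## Summary of Issues")
--     markdown.append("")
--
--     # Group issues by severity
--     issues_by_severity = {
--         "critical": [],
--         "high": [],
--         "medium": [],
--         "low": []
--     }
--
--     for issue in issues:
--         severity = issue.get("severity", "medium").lower()
--         if severity not in issues_by_severity:
--             severity = "medium"
--         issues_by_severity[severity].append(issue)
--
--     # Add summary table
--     markdown.append("| Severity | Count | Description |")
--     markdown.append("| --- | --- | --- |")
--
--     for severity, severity_issues in issues_by_severity.items():
--         count = len(severity_issues)
--         if count > 0:
--             description = {
--                 "critical": "Critical issues requiring immediate attention",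
--                 "high": "Significant issues that should be addressed",
--                 "medium": "Moderate issues to consider",
--                 "low": "Minor issues for awareness"
--             }.get(severity, "")
--
--             markdown.append(f"| {severity.capitalize()} | {count} | {description} |")
--
--     markdown.append("")
--
--     # Add detailed issues section
--     markdown.append("## Detailed Issues")
--     markdown.append("")
--
--     # Add issues by severity
--     for severity in ["critical", "high", "medium", "low"]:
--         severity_issues = issues_by_severity[severity]
--         if severity_issues:
--             markdown.append(f"### {severity.capitalize()} Issues")
--             markdown.append("")
--
--             for i, issue in enumerate(severity_issues, 1):
--                 markdown.append(f"#### Issue {i}")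
--                 markdown.append(f"- **Text**: \"{issue['text']}\"")
--
--                 if issue.get("comment"):
--                     markdown.append(f"- **Comment**: {issue['comment']}")
--
--                 if issue.get("suggestion"):
--                     markdown.append(f"- **Suggestion**: {issue['suggestion']}")
--
--                 markdown.append("")
--
--     return "\n".join(markdown)
-- ===== SOURCE B (Python) =====
-- # B: drops A's grouping dict; builds each section by per-severity filtered scans of the issues list.
-- _SEVERITIES = ("critical", "high", "medium", "low")
--
-- _DESCRIPTIONS = {
--     "critical": "Critical issues requiring immediate attention",
--     "high": "Significant issues that should be addressed",
--     "medium": "Moderate issues to consider",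
--     "low": "Minor issues for awareness",
-- }
--
--
-- def _matches(issue, target):
--     s = issue.get("severity", "medium").lower()
--     if s not in _SEVERITIES:
--         s = "medium"
--     return s == target
--
--
-- def _issues_with(issues, target):
--     return [i for i in issues if _matches(i, target)]
--
--
-- def _issue_block(i, issue):
--     lines = [f"#### Issue {i}", f"- **Text**: \"{issue['text']}\""]
--     if issue.get("comment"):
--         lines.append(f"- **Comment**: {issue['comment']}")
--     if issue.get("suggestion"):
--         lines.append(f"- **Suggestion**: {issue['suggestion']}")
--     lines.append("")
--     return lines
--
--
-- def create_summary_markdown(issues, title=None):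
--     parts = (["# " + title, ""] if title else [])
--     parts = parts + ["## Summary of Issues", "",
--                      "| Severity | Count | Description |", "| --- | --- | --- |"]
--     parts = parts + [
--         f"| {sev.capitalize()} | {len(_issues_with(issues, sev))} | {_DESCRIPTIONS[sev]} |"
--         for sev in _SEVERITIES
--         if _issues_with(issues, sev)
--     ]
--     parts = parts + ["", "## Detailed Issues", ""]
--     for sev in _SEVERITIES:
--         group = _issues_with(issues, sev)
--         if group:
--             parts = parts + [f"### {sev.capitalize()} Issues", ""]
--             for i, issue in enumerate(group, 1):
--                 parts = parts + _issue_block(i, issue)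
--     return "\n".join(parts)
-- ===== Notes on version B (the rewrite author's own statement) =====
-- stated objective: alternative
-- what changed: B removes A's issues_by_severity grouping dict entirely and instead builds each table row and detailed section by a per-severity filtered scan of the issues list (normalizing severity per issue), preserving input order within each severity.
import Mathlib
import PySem

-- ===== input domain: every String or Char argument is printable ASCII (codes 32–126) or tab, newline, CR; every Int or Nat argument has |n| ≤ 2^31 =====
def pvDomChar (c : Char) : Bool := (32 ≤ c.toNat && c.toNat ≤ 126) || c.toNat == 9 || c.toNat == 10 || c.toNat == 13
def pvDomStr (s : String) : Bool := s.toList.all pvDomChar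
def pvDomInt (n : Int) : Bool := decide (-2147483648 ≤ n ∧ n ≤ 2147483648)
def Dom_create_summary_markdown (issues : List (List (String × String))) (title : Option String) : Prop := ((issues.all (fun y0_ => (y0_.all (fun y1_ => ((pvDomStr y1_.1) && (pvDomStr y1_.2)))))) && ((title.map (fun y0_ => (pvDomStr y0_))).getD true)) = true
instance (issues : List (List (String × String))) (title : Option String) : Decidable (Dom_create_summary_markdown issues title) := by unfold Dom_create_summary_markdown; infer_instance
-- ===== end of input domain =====

-- B replaces A's grouping dict by per-severity filtered scans of the issues list; return value only, no mutation involved.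

-- str.capitalize, ported by hand (exact on the ASCII domain: first char uppercased, rest lowercased)
def pvCap (s : String) : String :=
  match s.toList with
  | [] => ""
  | c :: cs => String.ofList (PySem.Chars.upperChar c :: PySem.Chars.lower cs)

-- ===== PORT A =====
-- the literal description dict with .get(severity, "")
def pvDescGet (sev : String) : String :=
  (PySem.Dict.mk [("critical", "Critical issues requiring immediate attention"),
                  ("high", "Significant issues that should be addressed"),
                  ("medium", "Moderate issues to consider"),
                  ("low", "Minor issues for awareness")]).getD sev ""

-- issue["text"] (KeyError when absent, excluded by Pre_) is ported as getD "" under Pre_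
def create_summary_markdown (issues : List (List (String × String))) (title : Option String) : String :=
  let markdown : List String := []
  let markdown := match title with
    | some t => if t ≠ "" then markdown ++ ["# " ++ t, ""] else markdown
    | none => markdown
  let markdown := markdown ++ ["## Summary of Issues", ""]
  let ibs : PySem.Dict String (List (List (String × String))) :=
    PySem.Dict.mk [("critical", []), ("high", []), ("medium", []), ("low", [])]
  let ibs := issues.foldl (fun d issue =>
      let severity := PySem.Str.lower ((PySem.Dict.mk issue).getD "severity" "medium")
      let severity := if d.contains severity then severity else "medium"
      d.modify severity [] (· ++ [issue])) ibs
  let markdown := markdown ++ ["| Severity | Count | Description |", "| --- | --- | --- |"]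
  let markdown := ibs.items.foldl (fun acc p =>
      let count := p.2.length
      if count > 0 then
        acc ++ ["| " ++ pvCap p.1 ++ " | " ++ PySem.Int.toStr (count : Int) ++ " | " ++ pvDescGet p.1 ++ " |"]
      else acc) markdown
  let markdown := markdown ++ [""]
  let markdown := markdown ++ ["## Detailed Issues", ""]
  let markdown := ["critical", "high", "medium", "low"].foldl (fun acc sev =>
      let severity_issues := ibs.getD sev []
      if severity_issues ≠ [] then
        let acc := acc ++ ["### " ++ pvCap sev ++ " Issues", ""]
        (PySem.List.enumerate severity_issues 1).foldl (fun acc2 pi =>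
            let d := PySem.Dict.mk pi.2
            let acc2 := acc2 ++ ["#### Issue " ++ PySem.Int.toStr pi.1,
                                 "- **Text**: \"" ++ d.getD "text" "" ++ "\""]
            let acc2 := if d.getD "comment" "" ≠ "" then acc2 ++ ["- **Comment**: " ++ d.getD "comment" ""] else acc2
            let acc2 := if d.getD "suggestion" "" ≠ "" then acc2 ++ ["- **Suggestion**: " ++ d.getD "suggestion" ""] else acc2
            acc2 ++ [""]) acc
      else acc) markdown
  PySem.Str.join "\n" markdown

-- ===== PORT B =====
def pvSeverities : List String := ["critical", "high", "medium", "low"]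

def pvDesc (sev : String) : String :=
  if sev == "critical" then "Critical issues requiring immediate attention"
  else if sev == "high" then "Significant issues that should be addressed"
  else if sev == "medium" then "Moderate issues to consider"
  else "Minor issues for awareness"

def pvMatches (issue : List (String × String)) (target : String) : Bool :=
  let s := PySem.Str.lower ((PySem.Dict.mk issue).getD "severity" "medium")
  let s := if pvSeverities.contains s then s else "medium"
  s == target

def pvIssuesWith (issues : List (List (String × String))) (target : String) : List (List (String × String)) :=
  issues.filter (fun i => pvMatches i target)

def pvIssueBlock (i : Int) (issue : List (String × String)) : List String :=
  let d := PySem.Dict.mk issue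
  let lines := ["#### Issue " ++ PySem.Int.toStr i,
                "- **Text**: \"" ++ d.getD "text" "" ++ "\""]
  let lines := if d.getD "comment" "" ≠ "" then lines ++ ["- **Comment**: " ++ d.getD "comment" ""] else lines
  let lines := if d.getD "suggestion" "" ≠ "" then lines ++ ["- **Suggestion**: " ++ d.getD "suggestion" ""] else lines
  lines ++ [""]

def create_summary_markdown_alt (issues : List (List (String × String))) (title : Option String) : String :=
  let parts : List String := match title with
    | some t => if t ≠ "" then ["# " ++ t, ""] else []
    | none => []
  let parts := parts ++ ["## Summary of Issues", "",
                         "| Severity | Count | Description |", "| --- | --- | --- |"]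
  let parts := parts ++ (pvSeverities.filterMap (fun sev =>
      if pvIssuesWith issues sev ≠ [] then
        some ("| " ++ pvCap sev ++ " | " ++ PySem.Int.toStr ((pvIssuesWith issues sev).length : Int) ++ " | " ++ pvDesc sev ++ " |")
      else none))
  let parts := parts ++ ["", "## Detailed Issues", ""]
  let parts := parts ++ pvSeverities.flatMap (fun sev =>
      let group := pvIssuesWith issues sev
      if group ≠ [] then
        ("### " ++ pvCap sev ++ " Issues") :: "" ::
          (PySem.List.enumerate group 1).flatMap (fun p => pvIssueBlock p.1 p.2)
      else [])
  PySem.Str.join "\n" parts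

-- ===== PRECONDITION & SPEC =====
-- Pre_ excludes exactly the inputs where A raises KeyError: an issue without a "text" key.
def Pre_create_summary_markdown (issues : List (List (String × String))) (title : Option String) : Prop :=
  issues.all (fun issue => issue.any (fun p => p.1 == "text")) = true
instance (issues : List (List (String × String))) (title : Option String) : Decidable (Pre_create_summary_markdown issues title) := by unfold Pre_create_summary_markdown; infer_instance

def pvWitness_create_summary_markdown : (List (List (String × String))) × Option String :=
  ([[("text", "missing clause"), ("severity", "HIGH"), ("comment", "check this")]], some "Doc")

def Spec_create_summary_markdown (issues : List (List (String × String))) (title : Option String) (out : String) : Prop := out = create_summary_markdown_alt issues title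
instance (issues : List (List (String × String))) (title : Option String) (out : String) : Decidable (Spec_create_summary_markdown issues title out) := by unfold Spec_create_summary_markdown; infer_instance

-- ===== CLAIM (what is proved, stated in full; the proofs are below) =====
def Claim_equal_create_summary_markdown : Prop := ∀ (issues : List (List (String × String))) (title : Option String), Dom_create_summary_markdown issues title → Pre_create_summary_markdown issues title → Spec_create_summary_markdown issues title (create_summary_markdown issues title)

-- ===== LEMMAS AND PROOFS =====

-- A's grouping-dict state: the four fixed buckets
def pvState (c h m l : List (List (String × String))) : PySem.Dict String (List (List (String × String))) :=
  PySem.Dict.mk [("critical", c), ("high", h), ("medium", m), ("low", l)]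

-- the severity an issue is normalized to (shared characterisation of both ports' tests)
def pvNorm (issue : List (String × String)) : String :=
  let s := PySem.Str.lower ((PySem.Dict.mk issue).getD "severity" "medium")
  if pvSeverities.contains s then s else "medium"

theorem pvMatches_eq (issue : List (String × String)) (t : String) :
    pvMatches issue t = (pvNorm issue == t) := rfl

theorem pvState_contains (c h m l : List (List (String × String))) (s : String) :
    (pvState c h m l).contains s = pvSeverities.contains s := by
  rw [Bool.eq_iff_iff]
  simp only [pvState, pvSeverities, PySem.Dict.contains, List.contains, List.any_cons,
    List.any_nil, List.elem_eq_mem, List.mem_cons, List.not_mem_nil, or_false,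
    Bool.or_eq_true, beq_iff_eq, decide_eq_true_eq]
  tauto

theorem pvNorm_eq (issue : List (String × String)) :
    pvNorm issue = (if pvSeverities.contains
        (PySem.Str.lower ((PySem.Dict.mk issue).getD "severity" "medium")) then
      PySem.Str.lower ((PySem.Dict.mk issue).getD "severity" "medium") else "medium") := rfl

theorem pvNorm_mem (issue : List (String × String)) :
    pvNorm issue = "critical" ∨ pvNorm issue = "high" ∨ pvNorm issue = "medium" ∨
      pvNorm issue = "low" := by
  rw [pvNorm_eq]
  split
  · rename_i h
    simp only [pvSeverities, List.contains, List.elem_eq_mem, decide_eq_true_eq,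
      List.mem_cons, List.not_mem_nil, or_false] at h
    tauto
  · tauto

theorem pv_body_eq (c h m l : List (List (String × String))) (x : List (String × String)) :
    (let severity := PySem.Str.lower ((PySem.Dict.mk x).getD "severity" "medium")
     let severity := if (pvState c h m l).contains severity then severity else "medium"
     (pvState c h m l).modify severity [] (· ++ [x]))
    = (pvState c h m l).modify (pvNorm x) [] (· ++ [x]) := by
  simp only [pvState_contains]
  rw [pvNorm_eq]

theorem pv_modify_lit (c h m l : List (List (String × String))) (x : List (String × String)) :
    ((pvState c h m l).modify "critical" [] (· ++ [x]) = pvState (c ++ [x]) h m l) ∧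
    ((pvState c h m l).modify "high" [] (· ++ [x]) = pvState c (h ++ [x]) m l) ∧
    ((pvState c h m l).modify "medium" [] (· ++ [x]) = pvState c h (m ++ [x]) l) ∧
    ((pvState c h m l).modify "low" [] (· ++ [x]) = pvState c h m (l ++ [x])) := by
  refine ⟨?_, ?_, ?_, ?_⟩ <;>
    simp [pvState, PySem.Dict.modify, PySem.Dict.contains, PySem.Dict.getD, PySem.Dict.get?,
      PySem.Dict.insert]

theorem pv_group_fold (issues : List (List (String × String))) (c h m l : List (List (String × String))) :
    issues.foldl (fun d issue =>
      let severity := PySem.Str.lower ((PySem.Dict.mk issue).getD "severity" "medium")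
      let severity := if d.contains severity then severity else "medium"
      d.modify severity [] (· ++ [issue])) (pvState c h m l)
    = pvState (c ++ pvIssuesWith issues "critical") (h ++ pvIssuesWith issues "high")
              (m ++ pvIssuesWith issues "medium") (l ++ pvIssuesWith issues "low") := by
  induction issues generalizing c h m l with
  | nil => simp [pvIssuesWith]
  | cons x xs ih =>
    rw [List.foldl_cons, pv_body_eq]
    have hfil : ∀ t, pvIssuesWith (x :: xs) t =
        (if pvNorm x == t then [x] else []) ++ pvIssuesWith xs t := by
      intro t
      simp only [pvIssuesWith, List.filter_cons, pvMatches_eq]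
      split <;> simp_all
    rcases pvNorm_mem x with hn | hn | hn | hn
    · rw [hn, (pv_modify_lit c h m l x).1, ih]
      simp [hfil, hn, List.append_assoc]
    · rw [hn, (pv_modify_lit c h m l x).2.1, ih]
      simp [hfil, hn, List.append_assoc]
    · rw [hn, (pv_modify_lit c h m l x).2.2.1, ih]
      simp [hfil, hn, List.append_assoc]
    · rw [hn, (pv_modify_lit c h m l x).2.2.2, ih]
      simp [hfil, hn, List.append_assoc]


theorem pvState_items (c h m l : List (List (String × String))) :
    (pvState c h m l).items = [("critical", c), ("high", h), ("medium", m), ("low", l)] := rfl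

theorem pvState_getD_c (c h m l : List (List (String × String))) :
    (pvState c h m l).getD "critical" [] = c := by
  simp [pvState, PySem.Dict.getD, PySem.Dict.get?]

theorem pvState_getD_h (c h m l : List (List (String × String))) :
    (pvState c h m l).getD "high" [] = h := by
  simp [pvState, PySem.Dict.getD, PySem.Dict.get?]

theorem pvState_getD_m (c h m l : List (List (String × String))) :
    (pvState c h m l).getD "medium" [] = m := by
  simp [pvState, PySem.Dict.getD, PySem.Dict.get?]

theorem pvState_getD_l (c h m l : List (List (String × String))) :
    (pvState c h m l).getD "low" [] = l := by
  simp [pvState, PySem.Dict.getD, PySem.Dict.get?]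

theorem pv_inner_fold (lst : List (List (String × String))) (acc : List String) :
    (PySem.List.enumerate lst 1).foldl (fun acc2 pi =>
        let d := PySem.Dict.mk pi.2
        let acc2 := acc2 ++ ["#### Issue " ++ PySem.Int.toStr pi.1,
                             "- **Text**: \"" ++ d.getD "text" "" ++ "\""]
        let acc2 := if d.getD "comment" "" ≠ "" then acc2 ++ ["- **Comment**: " ++ d.getD "comment" ""] else acc2
        let acc2 := if d.getD "suggestion" "" ≠ "" then acc2 ++ ["- **Suggestion**: " ++ d.getD "suggestion" ""] else acc2
        acc2 ++ [""]) acc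
    = acc ++ (PySem.List.enumerate lst 1).flatMap (fun p => pvIssueBlock p.1 p.2) := by
  rw [← PySem.List.foldl_append_eq_flatMap]
  apply PySem.List.foldl_congr_mem
  intro a pi _
  simp only [pvIssueBlock]
  split_ifs <;> simp [List.append_assoc]

-- ===== VERDICT (by name: the statement is the Claim_ definition above) =====
theorem create_summary_markdown_spec : Claim_equal_create_summary_markdown := by
  intro issues title _ _
  unfold Spec_create_summary_markdown
  simp only [create_summary_markdown, create_summary_markdown_alt]
  rw [show PySem.Dict.mk [("critical", ([] : List (List (String × String)))), ("high", []),
        ("medium", []), ("low", [])] = pvState [] [] [] [] from rfl,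
      pv_group_fold issues [] [] [] []]
  simp only [List.nil_append, pvState_items, pvState_getD_c, pvState_getD_h, pvState_getD_m,
    pvState_getD_l, List.foldl_cons, List.foldl_nil, pv_inner_fold, pvSeverities,
    List.flatMap_cons, List.flatMap_nil, List.filterMap_cons, List.filterMap_nil]
  by_cases h1 : pvIssuesWith issues "critical" = [] <;>
    by_cases h2 : pvIssuesWith issues "high" = [] <;>
      by_cases h3 : pvIssuesWith issues "medium" = [] <;>
        by_cases h4 : pvIssuesWith issues "low" = [] <;>
          simp [h1, h2, h3, h4, List.length_pos_iff_ne_nil,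
            show pvDescGet "critical" = pvDesc "critical" from rfl,
            show pvDescGet "high" = pvDesc "high" from rfl,
            show pvDescGet "medium" = pvDesc "medium" from rfl,
            show pvDescGet "low" = pvDesc "low" from rfl,
            List.append_assoc]
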